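-- pv_equiv track=rewrite | github.com/iyzg/tsumu | scripts/cloze_generator.py | create_incremental_cloze
-- ===== SOURCE A (Python) =====
-- def create_incremental_cloze(text, chunk_size=20):
--     """Create incremental cloze cards revealing text progressively."""
--     words = text.split()
--     cards = []
--
--     for i in range(0, len(words), chunk_size):
--         chunk = ' '.join(words[i:i+chunk_size])
--         cloze_num = (i // chunk_size) + 1
--
--         # Build the card with previous chunks visible
--         card_text = ' '.join(words[:i]) + ' ' if i > 0 else ''
--         card_text += f"{{{{c1::{chunk}}}}}"
--
--         # Add remaining text as context (optional)
--         if i + chunk_size < len(words):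
--             card_text += ' ' + ' '.join(words[i+chunk_size:])
--
--         cards.append(card_text.strip())
--
--     return cards
-- ===== SOURCE B (Python) =====
-- def create_incremental_cloze(text, chunk_size=20):
--     """Create incremental cloze cards revealing text progressively."""
--     words = text.split()
--     if chunk_size < 0:
--         return []  # range(0, n, negative) is empty: no cards
--     groups = [' '.join(words[i:i + chunk_size])
--               for i in range(0, len(words), chunk_size)]
--     # suffix[j] = context after chunk j, built once right-to-left
--     suffixes = [''] * len(groups)
--     for j in range(len(groups) - 2, -1, -1):
--         suffixes[j] = ' ' + groups[j + 1] + suffixes[j + 1]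
--     # one forward pass: running prefix accumulator
--     cards = []
--     prefix = ''
--     for j, g in enumerate(groups):
--         cards.append(prefix + '{{c1::' + g + '}}' + suffixes[j])
--         prefix += g + ' '
--     return cards
-- ===== Notes on version B (the rewrite author's own statement) =====
-- stated objective: alternative
-- what changed: B builds each card from two running accumulators -- a right-to-left scan that precomputes the suffix context after every chunk, then one forward pass that extends a prefix string -- instead of A's per-card re-joining of the whole prefix and suffix word slices.
import Mathlib
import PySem

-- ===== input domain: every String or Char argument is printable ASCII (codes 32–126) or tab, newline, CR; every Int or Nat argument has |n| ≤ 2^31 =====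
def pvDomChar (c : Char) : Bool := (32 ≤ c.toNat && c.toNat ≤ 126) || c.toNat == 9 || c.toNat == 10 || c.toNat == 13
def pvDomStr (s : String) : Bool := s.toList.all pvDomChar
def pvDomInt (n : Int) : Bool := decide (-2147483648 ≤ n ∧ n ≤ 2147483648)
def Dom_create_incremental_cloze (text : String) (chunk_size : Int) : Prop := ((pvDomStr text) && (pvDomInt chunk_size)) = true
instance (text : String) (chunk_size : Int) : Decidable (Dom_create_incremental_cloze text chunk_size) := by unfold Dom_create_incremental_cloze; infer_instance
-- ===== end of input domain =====

-- B replaces A's per-card re-joining of the prefix/suffix word slices by two running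
-- accumulators: a right-to-left scan precomputing each suffix context, then one forward
-- pass extending a prefix string (objective: alternative decomposition, same cost).


-- ===== PORT A =====
def create_incremental_cloze (text : String) (chunk_size : Int) : List String :=
  let words := PySem.Chars.split₀ text.toList
  (PySem.List.pyRange 0 (words.length : Int) chunk_size).foldl (fun cards i =>
    let chunk := PySem.Chars.join [' '] (PySem.List.slice words (some i) (some (i + chunk_size)))
    -- cloze_num is computed by A but never used; omitted
    let card1 : List Char :=
      if 0 < i then PySem.Chars.join [' '] (PySem.List.slice words none (some i)) ++ [' '] else []
    let card2 := card1 ++ "{{c1::".toList ++ chunk ++ "}}".toList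
    let card3 :=
      if i + chunk_size < (words.length : Int) then
        card2 ++ [' '] ++ PySem.Chars.join [' '] (PySem.List.slice words (some (i + chunk_size)) none)
      else card2
    cards ++ [String.ofList (PySem.Chars.strip card3)]) []

-- ===== PORT B =====
-- backward loop `for j in range(len(groups)-2, -1, -1): suffixes[j] = ' ' + groups[j+1] + suffixes[j+1]`
-- ported as structural recursion building the suffix list right-to-left
def pvSuffixes : List (List Char) → List (List Char)
  | [] => []
  | [_] => [[]]
  | _ :: g2 :: rest =>
      match pvSuffixes (g2 :: rest) with
      | [] => []
      | s :: ss => ([' '] ++ g2 ++ s) :: s :: ss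

-- forward loop over (group, suffix) pairs with the running `prefix` accumulator
def pvCards : List Char → List (List Char) → List (List Char) → List (List Char)
  | _, [], _ => []
  | _, _ :: _, [] => []
  | pre, g :: gs, s :: ss =>
      (pre ++ "{{c1::".toList ++ g ++ "}}".toList ++ s) :: pvCards (pre ++ g ++ [' ']) gs ss

def create_incremental_cloze_alt (text : String) (chunk_size : Int) : List String :=
  let words := PySem.Chars.split₀ text.toList
  if chunk_size < 0 then []
  else
    let groups := (PySem.List.pyRange 0 (words.length : Int) chunk_size).map
      (fun i => PySem.Chars.join [' '] (PySem.List.slice words (some i) (some (i + chunk_size))))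
    (pvCards [] groups (pvSuffixes groups)).map String.ofList

-- ===== PRECONDITION & SPEC =====
-- Python's range(0, len(words), chunk_size) raises ValueError when chunk_size = 0; only that input is excluded.
def Pre_create_incremental_cloze (text : String) (chunk_size : Int) : Prop := chunk_size ≠ 0
instance (text : String) (chunk_size : Int) : Decidable (Pre_create_incremental_cloze text chunk_size) := by
  unfold Pre_create_incremental_cloze; infer_instance
def pvWitness_create_incremental_cloze : String × Int := ("a b c d e", 2)
def Spec_create_incremental_cloze (text : String) (chunk_size : Int) (out : List String) : Prop :=
  out = create_incremental_cloze_alt text chunk_size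
instance (text : String) (chunk_size : Int) (out : List String) : Decidable (Spec_create_incremental_cloze text chunk_size out) := by
  unfold Spec_create_incremental_cloze; infer_instance

-- ===== CLAIM (what is proved, stated in full; the proofs are below) =====
def Claim_equal_create_incremental_cloze : Prop := ∀ (text : String) (chunk_size : Int), Dom_create_incremental_cloze text chunk_size → Pre_create_incremental_cloze text chunk_size → Spec_create_incremental_cloze text chunk_size (create_incremental_cloze text chunk_size)

-- ===== LEMMAS AND PROOFS =====

def pvWrap (g : List Char) : List Char := "{{c1::".toList ++ g ++ "}}".toList

-- total suffix context after a chunk / total prefix context before one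
def pvSAll (gs : List (List Char)) : List Char := gs.flatMap (fun g => [' '] ++ g)
def pvPAll (gs : List (List Char)) : List Char := gs.flatMap (fun g => g ++ [' '])

def pvNice (cs : List Char) : Prop :=
  cs ≠ [] ∧ (∀ x ∈ cs.head?, PySem.Chars.isspace x = false) ∧ (∀ x ∈ cs.getLast?, PySem.Chars.isspace x = false)

def pvG (ws : List (List Char)) (c' k : ℕ) : List Char :=
  PySem.Chars.join [' '] ((ws.drop (c' * k)).take c')

def pvM (n c' : ℕ) : ℕ := if 0 < n then (n + c' - 1) / c' else 0

lemma pv_nice_congr {a b : List Char} (h : a = b) (ha : pvNice a) : pvNice b := h ▸ ha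

lemma pv_split0_go_words : ∀ (s cur : List Char) (acc : List (List Char)),
    (∀ w ∈ acc, w ≠ [] ∧ ∀ ch ∈ w, PySem.Chars.isspace ch = false) →
    (∀ ch ∈ cur, PySem.Chars.isspace ch = false) →
    ∀ w ∈ PySem.Chars.split₀.go s cur acc, w ≠ [] ∧ ∀ ch ∈ w, PySem.Chars.isspace ch = false := by
  intro s
  induction s with
  | nil =>
    intro cur acc hacc hcur w hw
    by_cases h : cur.isEmpty
    · simp [PySem.Chars.split₀.go, h] at hw
      exact hacc w hw
    · simp [PySem.Chars.split₀.go, h] at hw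
      rcases hw with h1 | h1
      · exact hacc w h1
      · subst h1
        constructor
        · simpa [List.isEmpty_iff] using h
        · intro ch hch; exact hcur ch (List.mem_reverse.mp hch)
  | cons c rest ih =>
    intro cur acc hacc hcur w hw
    by_cases hs : PySem.Chars.isspace c
    · by_cases h : cur.isEmpty
      · rw [PySem.Chars.split₀.go] at hw
        simp [hs, h] at hw
        exact ih [] acc hacc (by simp) w hw
      · rw [PySem.Chars.split₀.go] at hw
        simp [hs, h] at hw
        refine ih [] (cur.reverse :: acc) ?_ (by simp) w hw
        intro w' hw'
        rcases List.mem_cons.mp hw' with h1 | h1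
        · subst h1
          exact ⟨by simpa [List.isEmpty_iff] using h, fun ch hch => hcur ch (List.mem_reverse.mp hch)⟩
        · exact hacc w' h1
    · rw [PySem.Chars.split₀.go] at hw
      simp [hs] at hw
      refine ih (c :: cur) acc hacc ?_ w hw
      intro ch hch
      rcases List.mem_cons.mp hch with h1 | h1
      · subst h1; simpa using hs
      · exact hcur ch h1

lemma pv_split0_words (s : List Char) :
    ∀ w ∈ PySem.Chars.split₀ s, w ≠ [] ∧ ∀ ch ∈ w, PySem.Chars.isspace ch = false := by
  intro w hw
  exact pv_split0_go_words s [] [] (by simp) (by simp) w (by simpa [PySem.Chars.split₀] using hw)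

lemma pv_nice_word {w : List Char} (h1 : w ≠ []) (h2 : ∀ ch ∈ w, PySem.Chars.isspace ch = false) :
    pvNice w := by
  refine ⟨h1, ?_, ?_⟩
  · intro x hx; exact h2 x (List.mem_of_mem_head? hx)
  · intro x hx; exact h2 x (List.mem_of_getLast? hx)

lemma pv_nice_glue {a b : List Char} (mid : List Char) (ha : pvNice a) (hb : pvNice b) :
    pvNice (a ++ mid ++ b) := by
  obtain ⟨ha1, ha2, ha3⟩ := ha
  obtain ⟨hb1, hb2, hb3⟩ := hb
  refine ⟨by simp [hb1], ?_, ?_⟩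
  · intro x hx
    apply ha2
    rwa [List.append_assoc, List.head?_append_of_ne_nil _ ha1] at hx
  · intro x hx
    apply hb3
    rwa [List.getLast?_append_of_ne_nil _ hb1] at hx

lemma pv_nice_wrap (g : List Char) : pvNice (pvWrap g) := by
  refine ⟨by simp [pvWrap], ?_, ?_⟩
  · intro x hx
    simp [pvWrap] at hx
    subst hx; decide
  · intro x hx
    rw [pvWrap, List.getLast?_append_of_ne_nil _ (by simp : ("}}".toList : List Char) ≠ [])] at hx
    simp at hx
    subst hx; decide

lemma pv_nice_join : ∀ (l : List (List Char)), l ≠ [] → (∀ w ∈ l, pvNice w) →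
    pvNice (PySem.Chars.join [' '] l) := by
  intro l
  induction l with
  | nil => intro h; exact absurd rfl h
  | cons w t ih =>
    intro _ hall
    cases t with
    | nil => simpa [PySem.Chars.join, List.intercalate] using hall w (by simp)
    | cons y ys =>
      rw [PySem.Chars.join_cons_cons]
      have h1 := hall w (by simp)
      have h2 := ih (by simp) (fun w' hw' => hall w' (by simp [hw']))
      exact pv_nice_glue _ h1 h2

lemma pv_strip_nice {cs : List Char} (h : pvNice cs) : PySem.Chars.strip cs = cs := by
  obtain ⟨h1, h2, h3⟩ := h
  obtain ⟨a, t, rfl⟩ := List.exists_cons_of_ne_nil h1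
  have ha : PySem.Chars.isspace a = false := h2 a (by simp)
  rw [PySem.Chars.strip, PySem.Chars.lstrip, List.dropWhile_cons_of_neg (by simp [ha])]
  have hne : (a :: t) ≠ [] := by simp
  have hlb := (List.dropLast_append_getLast hne).symm
  have hb : PySem.Chars.isspace ((a :: t).getLast hne) = false := by
    apply h3
    rw [List.getLast?_eq_some_getLast hne]
    simp
  rw [hlb, PySem.Chars.rstrip]
  simp [List.dropWhile_cons_of_neg, hb]

lemma pv_join_append (sep : List Char) : ∀ (xs : List (List Char)) (y : List Char) (ys : List (List Char)),
    xs ≠ [] → PySem.Chars.join sep (xs ++ y :: ys) = PySem.Chars.join sep xs ++ sep ++ PySem.Chars.join sep (y :: ys) := by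
  intro xs
  induction xs with
  | nil => intro y ys h; exact absurd rfl h
  | cons w t ih =>
    intro y ys _
    cases t with
    | nil =>
      rw [List.singleton_append, PySem.Chars.join_cons_cons]
      simp [PySem.Chars.join, List.intercalate]
    | cons z zs =>
      rw [List.cons_append, List.cons_append, PySem.Chars.join_cons_cons, ← List.cons_append,
        ih y ys (by simp), PySem.Chars.join_cons_cons]
      simp [List.append_assoc]

lemma pv_lt_of_lt_m {n c' k : ℕ} (hc : 0 < c') (hk : k < pvM n c') : c' * k < n := by
  unfold pvM at hk
  by_cases hn : 0 < n
  · simp [hn] at hk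
    have h1 : (k + 1) * c' ≤ (n + c' - 1) / c' * c' := Nat.mul_le_mul_right _ hk
    have h2 : (n + c' - 1) / c' * c' ≤ n + c' - 1 := Nat.div_mul_le_self _ _
    have h3 : (k + 1) * c' ≤ n + c' - 1 := le_trans h1 h2
    have h4 : (k + 1) * c' = c' * k + c' := by ring
    omega
  · simp [hn] at hk

lemma pv_le_of_m {n c' : ℕ} (hc : 0 < c') : n ≤ c' * pvM n c' := by
  unfold pvM
  by_cases hn : 0 < n
  · simp [hn]
    have := Nat.div_add_mod (n + c' - 1) c'
    have := Nat.mod_lt (n + c' - 1) hc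
    omega
  · simp [hn]; omega

lemma pv_jtake {ws : List (List Char)} {c' : ℕ} (hc : 0 < c') :
    ∀ k, k ≤ pvM ws.length c' →
      PySem.Chars.join [' '] (((List.range (pvM ws.length c')).map (pvG ws c')).take k) =
      PySem.Chars.join [' '] (ws.take (c' * k)) := by
  intro k
  induction k with
  | zero => intro _; simp
  | succ k ih =>
    intro hk1
    have hk : k < pvM ws.length c' := hk1
    have hlt : c' * k < ws.length := pv_lt_of_lt_m hc hk
    have htk : ((List.range (pvM ws.length c')).map (pvG ws c')).take (k + 1)
        = (List.range k).map (pvG ws c') ++ [pvG ws c' k] := by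
      rw [← List.map_take, List.take_range, Nat.min_eq_left hk1, List.range_succ, List.map_append]
      simp
    have htk' : ((List.range (pvM ws.length c')).map (pvG ws c')).take k
        = (List.range k).map (pvG ws c') := by
      rw [← List.map_take, List.take_range, Nat.min_eq_left (le_of_lt hk)]
    have hws : ws.take (c' * (k + 1)) = ws.take (c' * k) ++ (ws.drop (c' * k)).take c' := by
      rw [show c' * (k + 1) = c' * k + c' by ring, List.take_add]
    have hseg : (ws.drop (c' * k)).take c' ≠ [] := by
      have : ((ws.drop (c' * k)).take c').length = min c' (ws.length - c' * k) := by simp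
      intro hnil
      rw [hnil] at this
      simp at this
      omega
    obtain ⟨s0, srest, hs⟩ := List.exists_cons_of_ne_nil hseg
    cases k with
    | zero =>
      simp at htk ⊢
      rw [htk]
      simp [PySem.Chars.join, List.intercalate, pvG]
    | succ k' =>
      have htne : ws.take (c' * (k' + 1)) ≠ [] := by
        intro hnil
        have : (ws.take (c' * (k' + 1))).length = min (c' * (k' + 1)) ws.length := by simp
        rw [hnil] at this
        simp at this
        have hpos : 0 < c' * (k' + 1) := Nat.mul_pos hc (Nat.succ_pos _)
        omega
      rw [htk, pv_join_append _ _ _ _ (by simp), ← htk', ih (le_of_lt hk), hws, hs,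
        pv_join_append _ _ _ _ htne, ← hs, PySem.Chars.join_singleton, pvG]

lemma pv_jdrop {ws : List (List Char)} {c' : ℕ} (hc : 0 < c') :
    ∀ d k, k + d = pvM ws.length c' →
      PySem.Chars.join [' '] (((List.range (pvM ws.length c')).map (pvG ws c')).drop k) =
      PySem.Chars.join [' '] (ws.drop (c' * k)) := by
  intro d
  induction d with
  | zero =>
    intro k hk
    simp only [Nat.add_zero] at hk
    rw [hk]
    have h1 : ws.length ≤ c' * pvM ws.length c' := pv_le_of_m hc
    rw [List.drop_eq_nil_of_le (by simp), List.drop_eq_nil_of_le h1]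
  | succ d ih =>
    intro k hk
    have hkm : k < pvM ws.length c' := by omega
    have hlt : c' * k < ws.length := pv_lt_of_lt_m hc hkm
    have hkl : k < ((List.range (pvM ws.length c')).map (pvG ws c')).length := by simp [hkm]
    have hdr : ((List.range (pvM ws.length c')).map (pvG ws c')).drop k
        = pvG ws c' k :: ((List.range (pvM ws.length c')).map (pvG ws c')).drop (k + 1) := by
      rw [List.drop_eq_getElem_cons hkl]
      simp
    have hws : ws.drop (c' * k) = (ws.drop (c' * k)).take c' ++ ws.drop (c' * (k + 1)) := by
      rw [show c' * (k + 1) = c' * k + c' by ring, ← List.drop_drop]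
      exact (List.take_append_drop _ _).symm
    by_cases hlast : k + 1 = pvM ws.length c'
    · have hnil2 : ((List.range (pvM ws.length c')).map (pvG ws c')).drop (k+1) = [] := by
        apply List.drop_eq_nil_of_le; simp [hlast]
      have hnil3 : ws.drop (c' * (k + 1)) = [] := by
        apply List.drop_eq_nil_of_le
        have := pv_le_of_m (n := ws.length) hc
        calc ws.length ≤ c' * pvM ws.length c' := this
        _ = c' * (k+1) := by rw [hlast]
      rw [hdr, hnil2, hws, hnil3, List.append_nil, pvG, PySem.Chars.join_singleton]
    · have hkm2 : k + 1 < pvM ws.length c' := by omega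
      have hlt2 : c' * (k + 1) < ws.length := pv_lt_of_lt_m hc hkm2
      have hrest : ws.drop (c' * (k + 1)) ≠ [] := by
        intro hnil
        have : (ws.drop (c' * (k+1))).length = ws.length - c' * (k+1) := by simp
        rw [hnil] at this; simp at this; omega
      obtain ⟨r0, rrest, hr⟩ := List.exists_cons_of_ne_nil hrest
      have hseg : (ws.drop (c' * k)).take c' ≠ [] := by
        intro hnil
        have : ((ws.drop (c' * k)).take c').length = min c' (ws.length - c' * k) := by simp
        rw [hnil] at this; simp at this; omega
      obtain ⟨s0, srest, hs⟩ := List.exists_cons_of_ne_nil hseg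
      have hdrrest : ((List.range (pvM ws.length c')).map (pvG ws c')).drop (k+1) ≠ [] := by
        intro hnil
        have : (((List.range (pvM ws.length c')).map (pvG ws c')).drop (k+1)).length
            = pvM ws.length c' - (k+1) := by simp
        rw [hnil] at this; simp at this; omega
      obtain ⟨g0, grest, hg⟩ := List.exists_cons_of_ne_nil hdrrest
      rw [hdr, hg, PySem.Chars.join_cons_cons, ← hg, ih (k+1) (by omega), hws, hs, hr,
        pv_join_append _ _ _ _ (by simp), ← hr, ← hs, pvG]

-- the backward suffix loop computes pvSAll of the remaining chunks
lemma pvSuffixes_cons : ∀ (g : List Char) (gs : List (List Char)),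
    pvSuffixes (g :: gs) = pvSAll gs :: pvSuffixes gs := by
  intro g gs
  induction gs generalizing g with
  | nil => simp [pvSuffixes, pvSAll]
  | cons g2 rest ih =>
    rw [pvSuffixes, ih g2]
    simp [pvSAll]

-- the forward pass produces, at index k, prefix ++ wrapped k-th chunk ++ suffix
lemma pvCards_spec : ∀ (gs : List (List Char)) (pre : List Char),
    pvCards pre gs (pvSuffixes gs) =
      (List.range gs.length).map
        (fun k => pre ++ pvPAll (gs.take k) ++ pvWrap (gs.getD k []) ++ pvSAll (gs.drop (k+1))) := by
  intro gs
  induction gs with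
  | nil => intro pre; simp [pvCards]
  | cons g t ih =>
    intro pre
    rw [pvSuffixes_cons, pvCards, ih (pre ++ g ++ [' '])]
    rw [List.length_cons, List.range_succ_eq_map, List.map_cons, List.map_map]
    congr 1
    · simp [pvPAll, pvWrap, pvSAll, List.append_assoc]
    · apply List.map_congr_left
      intro k _
      simp only [Function.comp_apply, List.getD, Nat.succ_eq_add_one, List.take_succ_cons,
        List.drop_succ_cons, List.getElem?_cons_succ]
      simp [pvPAll, List.append_assoc]

lemma pvPAll_eq : ∀ (xs : List (List Char)), xs ≠ [] →
    pvPAll xs = PySem.Chars.join [' '] xs ++ [' '] := by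
  intro xs
  induction xs with
  | nil => intro h; exact absurd rfl h
  | cons x t ih =>
    intro _
    cases t with
    | nil => simp [pvPAll, PySem.Chars.join, List.intercalate]
    | cons y ys =>
      rw [PySem.Chars.join_cons_cons]
      have := ih (by simp)
      simp only [pvPAll, List.flatMap_cons] at this ⊢
      rw [this]
      simp [List.append_assoc]

lemma pvSAll_eq : ∀ (xs : List (List Char)), xs ≠ [] →
    pvSAll xs = [' '] ++ PySem.Chars.join [' '] xs := by
  intro xs
  induction xs with
  | nil => intro h; exact absurd rfl h
  | cons x t ih =>
    intro _
    cases t with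
    | nil => simp [pvSAll, PySem.Chars.join, List.intercalate]
    | cons y ys =>
      rw [PySem.Chars.join_cons_cons]
      have := ih (by simp)
      simp only [pvSAll, List.flatMap_cons] at this ⊢
      rw [this]
      simp [List.append_assoc]

-- ===== VERDICT (by name: the statement is the Claim_ definition above) =====
theorem create_incremental_cloze_spec : Claim_equal_create_incremental_cloze := by
  intro text c _ hpre
  unfold Spec_create_incremental_cloze
  simp only [create_incremental_cloze, create_incremental_cloze_alt]
  set ws := PySem.Chars.split₀ text.toList with hws
  have hwords := pv_split0_words text.toList
  rw [← hws] at hwords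
  rcases lt_or_gt_of_ne hpre with hneg | hpos
  · -- negative step: empty range in A, the guard in B
    have hr : PySem.List.pyRange 0 (ws.length : Int) c = [] := by
      simp [PySem.List.pyRange, show ¬(0:Int) < c by omega, show ¬((ws.length:Int) < 0) by omega]
    rw [if_pos hneg]
    simp [hr]
  · -- positive step
    rw [if_neg (by omega)]
    set c' := c.toNat with hc'
    have hcc : c = (c' : Int) := by omega
    have hc1 : 0 < c' := by omega
    set n := ws.length with hn
    set m := pvM n c' with hm
    have hM : PySem.List.pyRange 0 (n : Int) c = (List.range m).map (fun k => ((c' * k : Nat) : Int)) := by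
      rw [PySem.List.pyRange_of_pos _ _ hpos]
      have hcnt : (if (0:Int) < (n:Int) then (((n:Int) - 0 + c - 1) / c).toNat else 0) = m := by
        by_cases hn0 : 0 < n
        · rw [if_pos (by exact_mod_cast hn0)]
          have h1 : ((n:Int) - 0 + c - 1) = ((n + c' - 1 : Nat) : Int) := by rw [hcc]; omega
          rw [h1, hcc, ← Int.natCast_div, Int.toNat_natCast, hm, pvM, if_pos hn0]
        · rw [if_neg (by omega), hm, pvM, if_neg hn0]
      rw [hcnt]
      apply List.map_congr_left
      intro k _
      rw [hcc]; push_cast; ring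
    rw [hM, PySem.List.foldl_append_singleton_eq_map, List.map_map, List.map_map]
    have hGk : ∀ k : ℕ, PySem.Chars.join [' '] (PySem.List.slice ws (some ((c' * k : Nat) : Int)) (some (((c' * k : Nat) : Int) + c))) = pvG ws c' k := by
      intro k
      have h2 : ((c' * k : Nat) : Int) + c = ((c' * k + c' : Nat) : Int) := by rw [hcc]; push_cast; ring
      rw [h2, PySem.List.slice_natCast, pvG, Nat.add_sub_cancel_left]
    have hGroups : List.map ((fun i => PySem.Chars.join [' '] (PySem.List.slice ws (some i) (some (i + c)))) ∘ (fun k : ℕ => ((c' * k : Nat) : Int))) (List.range m) = List.map (pvG ws c') (List.range m) :=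
      List.map_congr_left (fun k _ => hGk k)
    rw [hGroups]
    set groups := (List.range m).map (pvG ws c') with hgr
    have hglen : groups.length = m := by simp [hgr]
    rw [pvCards_spec groups [], hglen, List.map_map]
    simp only [List.nil_append]
    apply List.map_congr_left
    intro k hkmem
    simp only [Function.comp_apply]
    have hk : k < m := List.mem_range.mp hkmem
    have hlt : c' * k < n := pv_lt_of_lt_m hc1 hk
    have hn0 : 0 < n := by omega
    have hGetD : groups.getD k [] = pvG ws c' k := by
      rw [List.getD, hgr]
      rw [List.getElem?_map, List.getElem?_range hk]
      rfl
    have hcond1 : ((0:Int) < ((c' * k : Nat) : Int)) ↔ 0 < k := by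
      rw [Int.natCast_pos]
      exact Nat.mul_pos_iff_of_pos_left hc1
    have hcond2 : (((c' * k : Nat) : Int) + c < (n : Int)) ↔ k + 1 < m := by
      rw [hcc]
      constructor
      · intro h
        by_contra hge
        rw [not_lt] at hge
        have h1 := pv_le_of_m (n := n) (c' := c') hc1
        have h2 : n ≤ c' * (k + 1) := le_trans h1 (Nat.mul_le_mul_left _ (by omega))
        have h3 : (c' : Int) * k + c' < n := by push_cast at h ⊢; omega
        have h4 : ((c' * (k+1) : Nat) : Int) = (c':Int) * k + c' := by push_cast; ring
        omega
      · intro h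
        have h5 := pv_lt_of_lt_m hc1 (show k + 1 < pvM n c' from h)
        have h4 : ((c' * (k+1) : Nat) : Int) = (c':Int) * k + c' := by push_cast; ring
        push_cast
        omega
    have hT := pv_jtake (ws := ws) hc1 k (by rw [← hn, ← hm]; omega)
    have hD := pv_jdrop (ws := ws) hc1 (m - (k+1)) (k+1) (by rw [← hn, ← hm]; omega)
    rw [← hn, ← hm] at hT hD
    rw [← hgr] at hT hD
    have hcast1 : (((c' * k : Nat) : Int)).toNat = c' * k := by omega
    have hcast2 : ((((c' * k : Nat) : Int)) + c).toNat = c' * (k + 1) := by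
      rw [hcc, show ((c' * k : Nat) : Int) + (c' : Int) = ((c' * (k+1) : Nat) : Int) by push_cast; ring,
        Int.toNat_natCast]
    have hniceTake : 0 < k → pvNice (PySem.Chars.join [' '] (ws.take (c' * k))) := by
      intro hk0
      apply pv_nice_join
      · intro hnil
        have hl : (ws.take (c' * k)).length = min (c' * k) ws.length := by simp
        rw [hnil] at hl
        have hp : 0 < c' * k := Nat.mul_pos hc1 hk0
        simp only [List.length_nil] at hl
        omega
      · intro w hw
        have h := hwords w (List.take_subset _ _ hw)
        exact pv_nice_word h.1 h.2
    have hniceDrop : k + 1 < m → pvNice (PySem.Chars.join [' '] (ws.drop (c' * (k+1)))) := by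
      intro hk1
      apply pv_nice_join
      · intro hnil
        have hl : (ws.drop (c' * (k+1))).length = ws.length - c' * (k+1) := by simp
        rw [hnil] at hl
        have h := pv_lt_of_lt_m hc1 (show k + 1 < pvM n c' from hk1)
        simp only [List.length_nil] at hl
        omega
      · intro w hw
        have h := hwords w (List.drop_subset _ _ hw)
        exact pv_nice_word h.1 h.2
    have hniceChunk : pvNice (pvWrap (pvG ws c' k)) := pv_nice_wrap _
    have hTlen : (groups.take k).length = k := by simp [hglen]; omega
    by_cases hk0 : 0 < k <;> by_cases hk1 : k + 1 < m
    · -- middle card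
      have hTne : groups.take k ≠ [] := by
        intro h; rw [h] at hTlen; simp at hTlen; omega
      have hDne : groups.drop (k + 1) ≠ [] := by
        intro h
        have hl : (groups.drop (k+1)).length = m - (k+1) := by simp [hglen]
        rw [h] at hl; simp at hl; omega
      rw [if_pos (hcond2.mpr hk1), if_pos (hcond1.mpr hk0),
        PySem.List.slice_to _ (Int.natCast_nonneg _),
        PySem.List.slice_from _ (by omega), hcast1, hcast2, hGk k,
        hGetD, pvPAll_eq _ hTne, pvSAll_eq _ hDne, hT, hD]
      rw [pv_strip_nice ?_]
      · simp [pvWrap, List.append_assoc]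
      · exact pv_nice_congr (by simp [pvWrap, List.append_assoc])
          (pv_nice_glue ([' '] ++ pvWrap (pvG ws c' k) ++ [' ']) (hniceTake hk0) (hniceDrop hk1))
    · -- last card, k > 0
      have hTne : groups.take k ≠ [] := by
        intro h; rw [h] at hTlen; simp at hTlen; omega
      have hDnil : groups.drop (k + 1) = [] := by
        apply List.drop_eq_nil_of_le; omega
      rw [if_neg (fun h => hk1 (hcond2.mp h)), if_pos (hcond1.mpr hk0),
        PySem.List.slice_to _ (Int.natCast_nonneg _), hcast1, hGk k,
        hGetD, pvPAll_eq _ hTne, hDnil, hT]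
      rw [pv_strip_nice ?_]
      · simp [pvWrap, pvSAll, List.append_assoc]
      · exact pv_nice_congr (by simp [pvWrap, List.append_assoc])
          (pv_nice_glue ([' ']) (hniceTake hk0) hniceChunk)
    · -- first card, more follow
      have hk00 : k = 0 := by omega
      subst hk00
      have hDne : groups.drop 1 ≠ [] := by
        intro h
        have hl : (groups.drop 1).length = m - 1 := by simp [hglen]
        rw [h] at hl; simp at hl; omega
      rw [if_pos (hcond2.mpr hk1), if_neg (fun h => hk0 (hcond1.mp h)),
        PySem.List.slice_from _ (by omega), hcast2, hGk 0,
        hGetD, pvSAll_eq _ hDne, hD]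
      simp only [List.take_zero, List.nil_append]
      rw [pv_strip_nice ?_]
      · simp [pvWrap, pvPAll, List.append_assoc]
      · exact pv_nice_congr (by simp [pvWrap, List.append_assoc])
          (pv_nice_glue ([' ']) hniceChunk (hniceDrop hk1))
    · -- only card
      have hk00 : k = 0 := by omega
      subst hk00
      have hDnil : groups.drop 1 = [] := by
        apply List.drop_eq_nil_of_le; omega
      rw [if_neg (fun h => hk1 (hcond2.mp h)), if_neg (fun h => hk0 (hcond1.mp h)),
        hGk 0, hGetD, hDnil]
      simp only [List.take_zero, List.nil_append]
      rw [pv_strip_nice ?_]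
      · simp [pvWrap, pvPAll, pvSAll]
      · exact pv_nice_congr (by simp [pvWrap]) hniceChunk
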